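-- pv_equiv track=rewrite | github.com/lengthwisehems/retail2 | fidelity_inventory.py | determine_color_standardized
-- ===== SOURCE A (Python) =====
-- from typing import Any, Dict, Iterable, List, Optional, Tuple
--
-- def determine_color_standardized(tags: Iterable[str]) -> str:
--     tags_upper = [tag.upper() for tag in tags if tag]
--     checks = [
--         ("GREY", ["GREY"]),
--         ("PURPLE", ["PURPLE", "PALEPURPLE"]),
--         ("IVORY", ["IVORY"]),
--         ("BROWN", ["BROWN"]),
--         ("BLUE", ["BLUE"]),
--         ("WHITE", ["WHITE"]),
--         ("BLACK", ["BLACK"]),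
--         ("GREEN", ["GREEN"]),
--         ("RED", ["RED"]),
--         ("TAN", ["TAN"]),
--     ]
--     for label, keywords in checks:
--         if any(keyword in tag for tag in tags_upper for keyword in keywords):
--             return label
--     return ""
-- ===== SOURCE B (Python) =====
-- def determine_color_standardized(tags):
--     checks = [
--         ("GREY", ["GREY"]),
--         ("PURPLE", ["PURPLE", "PALEPURPLE"]),
--         ("IVORY", ["IVORY"]),
--         ("BROWN", ["BROWN"]),
--         ("BLUE", ["BLUE"]),
--         ("WHITE", ["WHITE"]),
--         ("BLACK", ["BLACK"]),
--         ("GREEN", ["GREEN"]),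
--         ("RED", ["RED"]),
--         ("TAN", ["TAN"]),
--     ]
--     # One pass over the tags: index which color labels are present at all.
--     matched = set()
--     for tag in tags:
--         if not tag:
--             continue
--         tag_upper = tag.upper()
--         for label, keywords in checks:
--             if any(keyword in tag_upper for keyword in keywords):
--                 matched.add(label)
--     # Separate priority scan over the fixed label order.
--     for label, _ in checks:
--         if label in matched:
--             return label
--     return ""
-- ===== Notes on version B (the rewrite author's own statement) =====
-- stated objective: alternative
-- what changed: A scans labels in priority order and for each label rescans all tags; B does one tag-major pass building a set of all matched labels, then a separate priority scan over the fixed label list.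
import Mathlib
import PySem

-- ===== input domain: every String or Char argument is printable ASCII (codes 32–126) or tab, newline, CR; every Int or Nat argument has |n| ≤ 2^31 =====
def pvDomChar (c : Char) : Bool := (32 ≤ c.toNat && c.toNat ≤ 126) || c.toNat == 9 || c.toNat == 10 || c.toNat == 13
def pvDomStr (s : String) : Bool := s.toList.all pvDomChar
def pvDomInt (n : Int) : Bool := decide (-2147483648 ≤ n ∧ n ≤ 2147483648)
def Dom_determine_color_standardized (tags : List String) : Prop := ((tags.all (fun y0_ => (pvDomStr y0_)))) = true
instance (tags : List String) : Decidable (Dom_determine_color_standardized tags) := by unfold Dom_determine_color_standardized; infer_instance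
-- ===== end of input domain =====

-- B replaces A's label-major nested scans by one tag-major pass that indexes the matched
-- labels in a set, followed by a separate priority scan over the label list (objective: alternative).

-- the fixed (label, keywords) table, shared data of both programs
def pvChecks : List (String × List String) :=
  [ ("GREY", ["GREY"]),
    ("PURPLE", ["PURPLE", "PALEPURPLE"]),
    ("IVORY", ["IVORY"]),
    ("BROWN", ["BROWN"]),
    ("BLUE", ["BLUE"]),
    ("WHITE", ["WHITE"]),
    ("BLACK", ["BLACK"]),
    ("GREEN", ["GREEN"]),
    ("RED", ["RED"]),
    ("TAN", ["TAN"]) ]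

-- ===== PORT A =====
-- A's 'for label, keywords in checks: if any(...): return label' loop
def pvGoA : List (String × List String) → List String → String
  | [], _ => ""
  | (label, keywords) :: rest, tags_upper =>
      if tags_upper.any (fun tag => keywords.any (fun keyword => PySem.Str.isIn keyword tag)) then
        label
      else pvGoA rest tags_upper

def determine_color_standardized (tags : List String) : String :=
  let tags_upper := (tags.filter (fun tag => !(tag == ""))).map PySem.Str.upper
  pvGoA pvChecks tags_upper

-- ===== PORT B =====
-- inner loop of B's single pass: add every label whose keywords hit this tag
def pvAddTag (acc : PySem.Set String) (tag_upper : String) : PySem.Set String :=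
  pvChecks.foldl
    (fun a p => if p.2.any (fun keyword => PySem.Str.isIn keyword tag_upper) then a.add p.1 else a)
    acc

-- B's final priority scan over the label order
def pvFirstLabel : List (String × List String) → PySem.Set String → String
  | [], _ => ""
  | (label, _) :: rest, matched =>
      if matched.contains label then label else pvFirstLabel rest matched

def determine_color_standardized_alt (tags : List String) : String :=
  let matched := tags.foldl
    (fun acc tag => if tag == "" then acc else pvAddTag acc (PySem.Str.upper tag))
    PySem.Set.empty
  pvFirstLabel pvChecks matched

-- ===== PRECONDITION & SPEC =====
def Spec_determine_color_standardized (tags : List String) (out : String) : Prop := out = determine_color_standardized_alt tags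
instance (tags : List String) (out : String) : Decidable (Spec_determine_color_standardized tags out) := by unfold Spec_determine_color_standardized; infer_instance

-- ===== CLAIM (what is proved, stated in full; the proofs are below) =====
def Claim_equal_determine_color_standardized : Prop := ∀ (tags : List String), Dom_determine_color_standardized tags → Spec_determine_color_standardized tags (determine_color_standardized tags)

-- ===== LEMMAS AND PROOFS =====

-- membership in the set after processing one tag (generic in the checks list)
theorem mem_foldl_add_iff (cs : List (String × List String)) (tag : String)
    (acc : PySem.Set String) (l : String) :
    l ∈ cs.foldl
        (fun a p => if p.2.any (fun keyword => PySem.Str.isIn keyword tag) then a.add p.1 else a)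
        acc
      ↔ l ∈ acc ∨ ∃ p ∈ cs, p.2.any (fun keyword => PySem.Str.isIn keyword tag) = true ∧ p.1 = l := by
  induction cs generalizing acc with
  | nil => simp
  | cons q qs ih =>
      simp only [List.foldl_cons, ih, List.mem_cons]
      by_cases h : q.2.any (fun keyword => PySem.Str.isIn keyword tag) = true
      · simp only [if_pos h, PySem.Set.mem_add]
        constructor
        · rintro (⟨hl | hl⟩ | ⟨p, hp, hhit, hlab⟩)
          · exact Or.inl hl
          · exact Or.inr ⟨q, Or.inl rfl, h, hl.symm⟩
          · exact Or.inr ⟨p, Or.inr hp, hhit, hlab⟩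
        · rintro (hl | ⟨p, hp | hp, hhit, hlab⟩)
          · exact Or.inl (Or.inl hl)
          · exact Or.inl (Or.inr (hp ▸ hlab.symm))
          · exact Or.inr ⟨p, hp, hhit, hlab⟩
      · simp only [if_neg h]
        constructor
        · rintro (hl | ⟨p, hp, hhit, hlab⟩)
          · exact Or.inl hl
          · exact Or.inr ⟨p, Or.inr hp, hhit, hlab⟩
        · rintro (hl | ⟨p, hp | hp, hhit, hlab⟩)
          · exact Or.inl hl
          · exact absurd (hp ▸ hhit) h
          · exact Or.inr ⟨p, hp, hhit, hlab⟩

-- membership in B's matched set, over tags_upper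
theorem mem_buildSet_iff (ts : List String) (acc : PySem.Set String) (l : String) :
    l ∈ ts.foldl pvAddTag acc
      ↔ l ∈ acc ∨ ∃ t ∈ ts, ∃ p ∈ pvChecks,
          p.2.any (fun keyword => PySem.Str.isIn keyword t) = true ∧ p.1 = l := by
  induction ts generalizing acc with
  | nil => simp
  | cons t ts ih =>
      simp only [List.foldl_cons, ih, pvAddTag, mem_foldl_add_iff, List.mem_cons]
      constructor
      · rintro (⟨hl | ⟨p, hp, hhit, hlab⟩⟩ | ⟨u, hu, p, hp, hhit, hlab⟩)
        · exact Or.inl hl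
        · exact Or.inr ⟨t, Or.inl rfl, p, hp, hhit, hlab⟩
        · exact Or.inr ⟨u, Or.inr hu, p, hp, hhit, hlab⟩
      · rintro (hl | ⟨u, hu | hu, p, hp, hhit, hlab⟩)
        · exact Or.inl (Or.inl hl)
        · exact Or.inl (Or.inr ⟨p, hp, hu ▸ hhit, hlab⟩)
        · exact Or.inr ⟨u, hu, p, hp, hhit, hlab⟩

-- B's skip-empty fold equals folding over A's filtered, uppercased list
theorem fold_skip_eq_fold_filtered (tags : List String) (acc : PySem.Set String) :
    tags.foldl (fun acc tag => if tag == "" then acc else pvAddTag acc (PySem.Str.upper tag)) acc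
      = ((tags.filter (fun tag => !(tag == ""))).map PySem.Str.upper).foldl pvAddTag acc := by
  induction tags generalizing acc with
  | nil => rfl
  | cons t ts ih =>
      by_cases h : (t == "") = true
      · rw [List.foldl_cons, if_pos h, List.filter_cons, if_neg (by simp [h])]
        exact ih acc
      · rw [List.foldl_cons, if_neg h, List.filter_cons, if_pos (by simp [h]),
            List.map_cons, List.foldl_cons]
        exact ih _

-- in pvChecks, a label determines its keyword list
theorem pvChecks_label_inj :
    ∀ p ∈ pvChecks, ∀ q ∈ pvChecks, q.1 = p.1 → q.2 = p.2 := by decide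

-- the two scans agree when the set indexes exactly the matched labels
theorem scan_eq (ts : List String) (matched : PySem.Set String)
    (cs : List (String × List String))
    (H : ∀ p ∈ cs, ((matched.contains p.1 = true) ↔
          ∃ t ∈ ts, p.2.any (fun keyword => PySem.Str.isIn keyword t) = true)) :
    pvGoA cs ts = pvFirstLabel cs matched := by
  induction cs with
  | nil => rfl
  | cons q qs ih =>
      obtain ⟨label, keywords⟩ := q
      have hq := H _ (List.mem_cons_self ..)
      simp only [pvGoA, pvFirstLabel]
      by_cases h : ts.any (fun tag => keywords.any (fun keyword => PySem.Str.isIn keyword tag)) = true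
      · rw [List.any_eq_true] at h
        obtain ⟨t, ht, hhit⟩ := h
        rw [if_pos (by simp [List.any_eq_true]; exact ⟨t, ht, by simpa using hhit⟩),
            if_pos (hq.mpr ⟨t, ht, hhit⟩)]
      · have h' : ¬ ∃ t ∈ ts, keywords.any (fun keyword => PySem.Str.isIn keyword t) = true := by
          intro ⟨t, ht, hhit⟩
          exact h (List.any_eq_true.mpr ⟨t, ht, hhit⟩)
        rw [if_neg (by simpa [List.any_eq_true] using h), if_neg (fun hc => h' (hq.mp hc))]
        exact ih (fun p hp => H p (List.mem_cons_of_mem _ hp))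

-- ===== VERDICT (by name: the statement is the Claim_ definition above) =====
theorem determine_color_standardized_spec : Claim_equal_determine_color_standardized := by
  intro tags _
  unfold Spec_determine_color_standardized determine_color_standardized determine_color_standardized_alt
  rw [fold_skip_eq_fold_filtered]
  set ts := (tags.filter (fun tag => !(tag == ""))).map PySem.Str.upper with hts
  apply scan_eq
  intro p hp
  rw [PySem.Set.contains_iff, mem_buildSet_iff]
  constructor
  · rintro (hl | ⟨t, ht, q, hq, hhit, hlab⟩)
    · simp [PySem.Set.empty] at hl
    · exact ⟨t, ht, (pvChecks_label_inj p hp q hq hlab) ▸ hhit⟩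
  · rintro ⟨t, ht, hhit⟩
    exact Or.inr ⟨t, ht, p, hp, hhit, rfl⟩
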